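-- pv_equiv track=rewrite | github.com/techstar9797/Parts | packages/matching/engine.py | _is_compatible_io_level
-- ===== SOURCE A (Python) =====
-- def _is_compatible_io_level(level1: str, level2: str) -> bool:
--     """Check if IO levels are compatible"""
--     # Simple compatibility check - can be enhanced
--     compatible_groups = [
--         {"3.3V", "3.3V CMOS", "3.3V TTL"},
--         {"5V", "5V TTL", "5V CMOS"},
--         {"1.8V", "1.8V CMOS"}
--     ]
--
--     for group in compatible_groups:
--         if level1 in group and level2 in group:
--             return True
--     return False
-- ===== SOURCE B (Python) =====
-- # B: table lookup — map each level to a group id once, then compare two lookups (idiomatic; no loop over groups at call time).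
-- _LEVEL_GROUP = {}
-- for _gid, _levels in enumerate([
--     ("3.3V", "3.3V CMOS", "3.3V TTL"),
--     ("5V", "5V TTL", "5V CMOS"),
--     ("1.8V", "1.8V CMOS"),
-- ]):
--     for _lv in _levels:
--         _LEVEL_GROUP[_lv] = _gid
--
--
-- def _is_compatible_io_level(level1: str, level2: str) -> bool:
--     g1 = _LEVEL_GROUP.get(level1)
--     return g1 is not None and g1 == _LEVEL_GROUP.get(level2)
-- ===== Notes on version B (the rewrite author's own statement) =====
-- stated objective: idiomatic
-- what changed: Replaced the per-call scan over compatibility groups with a level->group-id dict built once; the function body is two constant-time lookups and an equality test.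
import Mathlib
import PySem

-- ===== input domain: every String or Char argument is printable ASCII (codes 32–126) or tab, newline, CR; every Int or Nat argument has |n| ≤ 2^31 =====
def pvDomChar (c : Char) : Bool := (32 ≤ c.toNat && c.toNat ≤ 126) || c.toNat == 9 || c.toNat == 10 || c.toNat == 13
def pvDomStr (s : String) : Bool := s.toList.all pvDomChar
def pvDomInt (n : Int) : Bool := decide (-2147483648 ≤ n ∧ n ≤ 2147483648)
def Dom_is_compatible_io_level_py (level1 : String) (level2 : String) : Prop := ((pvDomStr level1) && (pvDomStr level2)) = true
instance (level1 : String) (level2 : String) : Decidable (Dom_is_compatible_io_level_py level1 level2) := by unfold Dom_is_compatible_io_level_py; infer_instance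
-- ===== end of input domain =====

-- B replaces A's per-call scan over the three compatibility groups by a level -> group-id table
-- built once and two lookups (idiomatic); return values are identical on all inputs.

-- ===== PORT A =====
-- the literal list of compatible_groups
def pvGroupsA : List (PySem.Set String) :=
  [PySem.Set.ofList ["3.3V", "3.3V CMOS", "3.3V TTL"],
   PySem.Set.ofList ["5V", "5V TTL", "5V CMOS"],
   PySem.Set.ofList ["1.8V", "1.8V CMOS"]]

-- the 'for group in compatible_groups: if level1 in group and level2 in group: return True' loop
def pvLoopA (level1 level2 : String) : List (PySem.Set String) → Bool
  | [] => false
  | g :: rest =>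
      if PySem.Set.contains g level1 && PySem.Set.contains g level2 then true
      else pvLoopA level1 level2 rest

def is_compatible_io_level_py (level1 : String) (level2 : String) : Bool :=
  pvLoopA level1 level2 pvGroupsA

-- ===== PORT B =====
-- _LEVEL_GROUP, built by the module-level enumerate loop in Source B (dict insertions in that order)
def pvLevelGroupB : PySem.Dict String Int :=
  [("3.3V", (0 : Int)), ("3.3V CMOS", 0), ("3.3V TTL", 0),
   ("5V", 1), ("5V TTL", 1), ("5V CMOS", 1),
   ("1.8V", 2), ("1.8V CMOS", 2)].foldl (fun d p => d.insert p.1 p.2) PySem.Dict.empty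

def is_compatible_io_level_py_alt (level1 : String) (level2 : String) : Bool :=
  match PySem.Dict.get? pvLevelGroupB level1 with
  | none => false
  | some g1 =>
      match PySem.Dict.get? pvLevelGroupB level2 with
      | none => false
      | some g2 => g1 == g2

-- ===== PRECONDITION & SPEC =====
def Spec_is_compatible_io_level_py (level1 : String) (level2 : String) (out : Bool) : Prop := out = is_compatible_io_level_py_alt level1 level2
instance (level1 : String) (level2 : String) (out : Bool) : Decidable (Spec_is_compatible_io_level_py level1 level2 out) := by unfold Spec_is_compatible_io_level_py; infer_instance

-- ===== CLAIM (what is proved, stated in full; the proofs are below) =====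
def Claim_equal_is_compatible_io_level_py : Prop := ∀ (level1 : String) (level2 : String), Dom_is_compatible_io_level_py level1 level2 → Spec_is_compatible_io_level_py level1 level2 (is_compatible_io_level_py level1 level2)

-- ===== LEMMAS AND PROOFS =====

-- every string is one of the nine known levels or none of them
theorem pvStringCases (s : String) :
    s = "3.3V" ∨ s = "3.3V CMOS" ∨ s = "3.3V TTL" ∨ s = "5V" ∨ s = "5V TTL" ∨
    s = "5V CMOS" ∨ s = "1.8V" ∨ s = "1.8V CMOS" ∨
    ("3.3V" ≠ s ∧ s ≠ "3.3V" ∧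
     "3.3V CMOS" ≠ s ∧ s ≠ "3.3V CMOS" ∧
     "3.3V TTL" ≠ s ∧ s ≠ "3.3V TTL" ∧
     "5V" ≠ s ∧ s ≠ "5V" ∧
     "5V TTL" ≠ s ∧ s ≠ "5V TTL" ∧
     "5V CMOS" ≠ s ∧ s ≠ "5V CMOS" ∧
     "1.8V" ≠ s ∧ s ≠ "1.8V" ∧
     "1.8V CMOS" ≠ s ∧ s ≠ "1.8V CMOS") := by
  by_cases h1 : s = "3.3V" <;> by_cases h2 : s = "3.3V CMOS" <;> by_cases h3 : s = "3.3V TTL" <;>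
  by_cases h4 : s = "5V" <;> by_cases h5 : s = "5V TTL" <;> by_cases h6 : s = "5V CMOS" <;>
  by_cases h7 : s = "1.8V" <;> by_cases h8 : s = "1.8V CMOS" <;> tauto

-- ===== VERDICT (by name: the statement is the Claim_ definition above) =====
theorem is_compatible_io_level_py_spec : Claim_equal_is_compatible_io_level_py := by
  intro l1 l2 _
  unfold Spec_is_compatible_io_level_py
  rcases pvStringCases l1 with h1|h1|h1|h1|h1|h1|h1|h1|h1 <;>
    rcases pvStringCases l2 with h2|h2|h2|h2|h2|h2|h2|h2|h2 <;>
    first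
      | (subst h1; subst h2; decide)
      | (subst_vars;
         simp only [is_compatible_io_level_py, is_compatible_io_level_py_alt, pvLoopA,
           pvGroupsA, pvLevelGroupB, PySem.Set.contains, PySem.Set.ofList, PySem.Set.add,
           PySem.Dict.get?, PySem.Dict.insert, PySem.Dict.empty, List.find?];
         simp_all [beq_iff_eq])
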